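-- pv_equiv track=rewrite | github.com/CinderleafFFE/beatswap | make_schedule.py | normalize_notation
-- ===== SOURCE A (Python) =====
-- def normalize_notation(notation: str):
--     # In particular, if multiple markers occur in one comma, the final one is taken
--     # Majdata seems to work properly only if markers are at the start of a comma
--     new_commas = []
--     for comma in notation.split(','):
--         bpm = ""
--         denom = None
--         pos = 0
--         new_comma = ""
--         while pos < len(comma):
--             # If bpm marker encountered
--             if comma[pos] == '(':
--                 cl = comma.find(')', pos)
--                 bpm = comma[pos+1:cl]
--                 # Delete marker
--                 comma = comma[:pos] + comma[cl+1:]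
--                 continue
--             # If denominator marker encountered
--             if comma[pos] == '{':
--                 cl = comma.find('}', pos)
--                 denom = int(comma[pos+1:cl])
--                 # Delete marker
--                 comma = comma[:pos] + comma[cl+1:]
--                 continue
--             pos += 1
--         if bpm != "":
--             new_comma += f'({bpm})'
--         if denom is not None:
--             new_comma += f'{{{denom}}}'
--         new_comma += comma
--         new_commas.append(new_comma)
--     return ','.join(new_commas)
-- ===== SOURCE B (Python) =====
-- def normalize_notation(notation: str):
--     # Single left-to-right pass per comma: a small state machine collects kept
--     # characters and the contents of the last '(...)' and '{...}' markers.
--     parts = []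
--     for comma in notation.split(','):
--         bpm = ""
--         denom = None
--         kept = []
--         mode = 0  # 0 = normal, 1 = inside '(...)', 2 = inside '{...}'
--         buf = []
--         for c in comma:
--             if mode == 0:
--                 if c == '(':
--                     mode = 1
--                     buf = []
--                 elif c == '{':
--                     mode = 2
--                     buf = []
--                 else:
--                     kept.append(c)
--             elif mode == 1:
--                 if c == ')':
--                     bpm = ''.join(buf)
--                     mode = 0
--                 else:
--                     buf.append(c)
--             else:
--                 if c == '}':
--                     denom = int(''.join(buf))
--                     mode = 0
--                 else:
--                     buf.append(c)
--         prefix = ('(%s)' % bpm if bpm != "" else '')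
--         if denom is not None:
--             prefix += '{%d}' % denom
--         parts.append(prefix + ''.join(kept))
--     return ','.join(parts)
-- ===== Notes on version B (the rewrite author's own statement) =====
-- stated objective: faster
-- what changed: A repeatedly cuts markers out of the comma string with find() and slice concatenation (quadratic per comma); B makes one left-to-right pass per comma with a tiny state machine that collects kept characters and the last '(...)'/'{...}' contents. Pre_ excludes only inputs on which A raises (ValueError from int()) or loops forever (an unclosed '(' or '{' marker).
import Mathlib
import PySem

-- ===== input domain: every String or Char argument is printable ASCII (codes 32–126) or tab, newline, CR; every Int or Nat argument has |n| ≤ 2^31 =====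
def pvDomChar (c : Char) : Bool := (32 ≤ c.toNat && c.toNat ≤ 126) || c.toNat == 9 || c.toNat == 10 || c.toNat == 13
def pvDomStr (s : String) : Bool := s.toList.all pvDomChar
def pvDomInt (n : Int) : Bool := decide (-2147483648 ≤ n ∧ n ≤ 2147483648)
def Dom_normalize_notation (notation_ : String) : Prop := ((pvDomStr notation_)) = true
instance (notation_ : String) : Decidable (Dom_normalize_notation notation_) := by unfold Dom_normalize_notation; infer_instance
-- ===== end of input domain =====

-- B replaces A's quadratic find/slice-and-delete loop by a single left-to-right
-- state-machine pass per comma (objective: faster, asymptotic).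


-- ===== PORT A =====
-- A's while loop: pos scans the comma; markers are cut out with find + slicing.
-- Fuel only makes the loop total: on inputs excluded by Pre_ the Python loop never
-- returns (or raises), and the bail-out values below are never reached under Pre_.
-- Slices comma[:pos], comma[cl+1:], comma[pos+1:cl] have nonnegative in-order bounds,
-- so PySem.List.slice is used for the bpm/denom slice and take/drop for the
-- prefix/suffix concatenation (exact for these bounds).
def nnLoopA : Nat → List Char → Nat → List Char → Option Int → List Char × List Char × Option Int
  | 0, comma, _, bpm, denom => (comma, bpm, denom)  -- fuel exhausted (unreachable under Pre_)
  | fuel+1, comma, pos, bpm, denom =>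
    if h : pos < comma.length then
      if comma[pos] = '(' then
        let cl := PySem.Chars.findFrom comma [')'] (pos : Int)
        if 0 ≤ cl then
          nnLoopA fuel (comma.take pos ++ comma.drop (cl.toNat + 1)) pos
            (PySem.List.slice comma (some ((pos : Int) + 1)) (some cl)) denom
        else (comma, bpm, denom)  -- no ')': Python's loop never returns (outside Pre_)
      else if comma[pos] = '{' then
        let cl := PySem.Chars.findFrom comma ['}'] (pos : Int)
        if 0 ≤ cl then
          match PySem.Int.ofChars? (PySem.List.slice comma (some ((pos : Int) + 1)) (some cl)) with
          | some d => nnLoopA fuel (comma.take pos ++ comma.drop (cl.toNat + 1)) pos bpm (some d)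
          | none => (comma, bpm, denom)  -- int() raises ValueError (outside Pre_)
        else (comma, bpm, denom)  -- no '}': Python raises or never returns (outside Pre_)
      else nnLoopA fuel comma (pos + 1) bpm denom
    else (comma, bpm, denom)

def normalize_notation (notation_ : String) : String :=
  let new_commas := (PySem.Chars.splitOn notation_.toList [',']).map (fun comma =>
    let r := nnLoopA (2 * comma.length + 1) comma 0 [] none
    (if r.2.1 ≠ [] then '(' :: r.2.1 ++ [')'] else []) ++
    (match r.2.2 with
     | some d => '{' :: PySem.Int.toChars d ++ ['}']
     | none => []) ++ r.1)
  String.ofList (PySem.Chars.join [','] new_commas)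

-- ===== PORT B =====
-- B's single pass: mode 0 = normal, 1 = inside '(...)', 2 = inside '{...}'.
-- Returns (kept, bpm, denom).
def nnScanB : List Char → Nat → List Char → List Char → List Char → Option Int → List Char × List Char × Option Int
  | [], _, _, kept, bpm, denom => (kept, bpm, denom)
  | c :: rest, mode, buf, kept, bpm, denom =>
    if mode = 0 then
      if c = '(' then nnScanB rest 1 [] kept bpm denom
      else if c = '{' then nnScanB rest 2 [] kept bpm denom
      else nnScanB rest 0 buf (kept ++ [c]) bpm denom
    else if mode = 1 then
      if c = ')' then nnScanB rest 0 buf kept buf denom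
      else nnScanB rest 1 (buf ++ [c]) kept bpm denom
    else
      if c = '}' then
        match PySem.Int.ofChars? buf with
        | some d => nnScanB rest 0 buf kept bpm (some d)
        | none => (kept, bpm, denom)  -- int() raises ValueError (outside Pre_)
      else nnScanB rest 2 (buf ++ [c]) kept bpm denom

def normalize_notation_alt (notation_ : String) : String :=
  let parts := (PySem.Chars.splitOn notation_.toList [',']).map (fun comma =>
    let r := nnScanB comma 0 [] [] [] none
    (if r.2.1 ≠ [] then '(' :: r.2.1 ++ [')'] else []) ++
    (match r.2.2 with
     | some d => '{' :: PySem.Int.toChars d ++ ['}']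
     | none => []) ++ r.1)
  String.ofList (PySem.Chars.join [','] parts)

-- ===== PRECONDITION & SPEC =====
-- Well-formedness checker: wfAux walks the comma once; 'some cl' means a marker is
-- open and waits for its closer cl ('}' contents, gathered in acc, must be int()-parseable).
def wfAux : List Char → Option Char → List Char → Bool
  | [], pending, _ => pending.isNone
  | c :: rest, none, _ =>
    if c = '(' then wfAux rest (some ')') []
    else if c = '{' then wfAux rest (some '}') []
    else wfAux rest none []
  | c :: rest, some cl, acc =>
    if c = cl then (decide (cl ≠ '}') || (PySem.Int.ofChars? acc).isSome) && wfAux rest none []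
    else wfAux rest (some cl) (acc ++ [c])

-- Well-formed comma: every '(' marker is closed by a later ')', every '{' marker is
-- closed by a later '}' with int()-parseable contents. A returns normally exactly there.
def wfComma (cs : List Char) : Bool := wfAux cs none []

-- Pre_ excludes only inputs on which A raises (ValueError from int()) or never
-- returns (a '(' or '{' marker that is never closed makes A's loop run forever).
def Pre_normalize_notation (notation_ : String) : Prop :=
  ∀ comma ∈ PySem.Chars.splitOn notation_.toList [','], wfComma comma = true
instance (notation_ : String) : Decidable (Pre_normalize_notation notation_) := by
  unfold Pre_normalize_notation; infer_instance

def pvWitness_normalize_notation : String := "(8)a{4}b,c"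

def Spec_normalize_notation (notation_ : String) (out : String) : Prop := out = normalize_notation_alt notation_
instance (notation_ : String) (out : String) : Decidable (Spec_normalize_notation notation_ out) := by unfold Spec_normalize_notation; infer_instance

-- ===== CLAIM (what is proved, stated in full; the proofs are below) =====
def Claim_equal_normalize_notation : Prop := ∀ (notation_ : String), Dom_normalize_notation notation_ → Pre_normalize_notation notation_ → Spec_normalize_notation notation_ (normalize_notation notation_)

-- ===== LEMMAS AND PROOFS =====

lemma wfAux_some (cl : Char) : ∀ (rest acc : List Char), wfAux rest (some cl) acc = true →
    ∃ content rest2, rest = content ++ cl :: rest2 ∧ cl ∉ content ∧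
      (cl = '}' → (PySem.Int.ofChars? (acc ++ content)).isSome = true) ∧ wfAux rest2 none [] = true := by
  intro rest
  induction rest with
  | nil => intro acc h; simp [wfAux] at h
  | cons c rest ih =>
    intro acc h
    by_cases hc : c = cl
    · subst hc
      rw [wfAux, if_pos rfl, Bool.and_eq_true] at h
      refine ⟨[], rest, by simp, by simp, ?_, h.2⟩
      intro hcl
      subst hcl
      simpa using h.1
    · rw [wfAux, if_neg hc] at h
      obtain ⟨content, rest2, hr, hn, hp, hw⟩ := ih (acc ++ [c]) h
      refine ⟨c :: content, rest2, by simp [hr], ?_, ?_, hw⟩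
      · simp [hn]
        exact fun hh => hc hh.symm
      · intro hcl
        simpa [List.append_assoc] using hp hcl

lemma nnScanB_buf_irrel : ∀ (s buf buf' kept bpm : List Char) (denom : Option Int),
    nnScanB s 0 buf kept bpm denom = nnScanB s 0 buf' kept bpm denom := by
  intro s
  induction s with
  | nil => intro buf buf' kept bpm denom; simp [nnScanB]
  | cons c rest ih =>
    intro buf buf' kept bpm denom
    by_cases h1 : c = '('
    · simp [nnScanB, h1]
    · by_cases h2 : c = '{'
      · simp [nnScanB, h2]
      · simp only [nnScanB, if_neg h1, if_neg h2]
        exact ih buf buf' (kept ++ [c]) bpm denom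

lemma nnScanB_mode1 : ∀ (content : List Char), ')' ∉ content →
    ∀ (rest buf kept bpm : List Char) (denom : Option Int),
    nnScanB (content ++ ')' :: rest) 1 buf kept bpm denom
      = nnScanB rest 0 (buf ++ content) kept (buf ++ content) denom := by
  intro content
  induction content with
  | nil => intro _ rest buf kept bpm denom; simp [nnScanB]
  | cons c content' ih =>
    intro hn rest buf kept bpm denom
    have hc : c ≠ ')' := fun h => hn (by simp [h])
    have hn' : ')' ∉ content' := fun h => hn (by simp [h])
    simp only [List.cons_append, nnScanB, if_neg hc]
    norm_num
    rw [ih hn' rest (buf ++ [c]) kept bpm denom]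
    simp

lemma nnScanB_mode2 : ∀ (content : List Char), '}' ∉ content →
    ∀ (rest buf kept bpm : List Char) (denom : Option Int),
    nnScanB (content ++ '}' :: rest) 2 buf kept bpm denom
      = (match PySem.Int.ofChars? (buf ++ content) with
         | some d => nnScanB rest 0 (buf ++ content) kept bpm (some d)
         | none => (kept, bpm, denom)) := by
  intro content
  induction content with
  | nil => intro _ rest buf kept bpm denom; simp [nnScanB]
  | cons c content' ih =>
    intro hn rest buf kept bpm denom
    have hc : c ≠ '}' := fun h => hn (by simp [h])
    have hn' : '}' ∉ content' := fun h => hn (by simp [h])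
    simp only [List.cons_append, nnScanB, if_neg hc]
    norm_num
    rw [ih hn' rest (buf ++ [c]) kept bpm denom]
    simp

lemma find_go_singleton (c : Char) : ∀ (pre : List Char), c ∉ pre → ∀ (rest : List Char) (k : Nat),
    PySem.Chars.find.go [c] (pre ++ c :: rest) k = ((k + pre.length : Nat) : Int) := by
  intro pre
  induction pre with
  | nil =>
    intro _ rest k
    simp [PySem.Chars.find.go, List.isPrefixOf]
  | cons p ps ih =>
    intro hn rest k
    have hp : ¬ ([c].isPrefixOf (p :: (ps ++ c :: rest)) = true) := by
      simp [List.isPrefixOf]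
      intro h
      exact absurd h.symm (fun hh => hn (by simp [hh]))
    rw [List.cons_append, PySem.Chars.find.go, if_neg hp]
    rw [ih (fun h => hn (by simp [h])) rest (k + 1)]
    push_cast [List.length_cons]
    ring

lemma find_singleton {c : Char} {pre : List Char} (h : c ∉ pre) (rest : List Char) :
    PySem.Chars.find (pre ++ c :: rest) [c] = ((pre.length : Nat) : Int) := by
  rw [PySem.Chars.find, find_go_singleton c pre h rest 0]
  norm_num

lemma nnLoop_eq_scan : ∀ (fuel : Nat) (s kept bpm : List Char) (denom : Option Int),
    wfComma s = true → s.length < fuel →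
    nnLoopA fuel (kept ++ s) kept.length bpm denom = nnScanB s 0 [] kept bpm denom := by
  intro fuel
  induction fuel with
  | zero => intro s kept bpm denom _ hlt; exact absurd hlt (by omega)
  | succ fuel ih =>
    intro s kept bpm denom hwf hlt
    cases s with
    | nil =>
      simp only [List.append_nil, nnScanB, nnLoopA]
      rw [dif_neg (by omega)]
    | cons c rest =>
      have hlen : kept.length < (kept ++ c :: rest).length := by simp
      have hget : (kept ++ c :: rest)[kept.length]'hlen = c := by
        rw [List.getElem_append_right (Nat.le_refl _)]
        simp
      simp only [nnLoopA]
      rw [dif_pos hlen]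
      by_cases h1 : c = '('
      · -- bpm marker
        subst h1
        have hwf' : wfAux rest (some ')') [] = true := by
          simpa [wfComma, wfAux] using hwf
        obtain ⟨content, rest2, hrest, hnc, -, hwf2⟩ := wfAux_some ')' rest [] hwf'
        subst hrest
        have hfind : PySem.Chars.findFrom (kept ++ '(' :: (content ++ ')' :: rest2)) [')'] (kept.length : Int)
            = ((kept.length + (content.length + 1) : Nat) : Int) := by
          rw [PySem.Chars.findFrom_natCast _ [')'] kept.length (by simp)]
          rw [List.drop_left]
          rw [show ('(' : Char) :: (content ++ ')' :: rest2) = ('(' :: content) ++ ')' :: rest2 from rfl]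
          rw [find_singleton (by simp; exact hnc) rest2]
          rw [if_neg (by omega)]
          push_cast [List.length_cons]
          ring
        rw [hget, if_pos rfl, hfind, if_pos (by omega)]
        have htoNat : (((kept.length + (content.length + 1) : Nat) : Int)).toNat = kept.length + content.length + 1 := by
          rw [Int.toNat_natCast]; omega
        have hdrop1 : (kept ++ '(' :: (content ++ ')' :: rest2)).drop (kept.length + 1) = content ++ ')' :: rest2 := by
          rw [show kept ++ '(' :: (content ++ ')' :: rest2) = (kept ++ ['(']) ++ (content ++ ')' :: rest2) by simp]
          rw [show kept.length + 1 = (kept ++ ['(']).length by simp]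
          exact List.drop_left
        have hslice : PySem.List.slice (kept ++ '(' :: (content ++ ')' :: rest2))
            (some ((kept.length : Int) + 1)) (some ((kept.length + (content.length + 1) : Nat) : Int)) = content := by
          rw [show ((kept.length : Int) + 1) = ((kept.length + 1 : Nat) : Int) by push_cast; ring]
          rw [PySem.List.slice_natCast]
          rw [hdrop1, show kept.length + (content.length + 1) - (kept.length + 1) = content.length by omega]
          exact List.take_left
        have htake : (kept ++ '(' :: (content ++ ')' :: rest2)).take kept.length = kept :=
          List.take_left
        have hdrop2 : (kept ++ '(' :: (content ++ ')' :: rest2)).drop (kept.length + content.length + 1 + 1) = rest2 := by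
          rw [show kept ++ '(' :: (content ++ ')' :: rest2) = (kept ++ '(' :: content ++ [')']) ++ rest2 by simp]
          rw [show kept.length + content.length + 1 + 1 = (kept ++ '(' :: content ++ [')']).length by simp; omega]
          exact List.drop_left
        rw [hslice, htoNat, htake, hdrop2]
        rw [ih rest2 kept content denom hwf2 (by simp at hlt ⊢; omega)]
        have hr : nnScanB ('(' :: (content ++ ')' :: rest2)) 0 [] kept bpm denom
            = nnScanB rest2 0 content kept content denom := by
          simp [nnScanB]
          rw [nnScanB_mode1 content hnc rest2 [] kept bpm denom]
          simp
        rw [hr]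
        exact nnScanB_buf_irrel rest2 [] content kept content denom
      · by_cases h2 : c = '{'
        · -- denominator marker
          subst h2
          have hwf' : wfAux rest (some '}') [] = true := by
            simpa [wfComma, wfAux] using hwf
          obtain ⟨content, rest2, hrest, hnc, hparse, hwf2⟩ := wfAux_some '}' rest [] hwf'
          subst hrest
          have hsome : (PySem.Int.ofChars? content).isSome = true := by simpa using hparse rfl
          have hfind : PySem.Chars.findFrom (kept ++ '{' :: (content ++ '}' :: rest2)) ['}'] (kept.length : Int)
              = ((kept.length + (content.length + 1) : Nat) : Int) := by
            rw [PySem.Chars.findFrom_natCast _ ['}'] kept.length (by simp)]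
            rw [List.drop_left]
            rw [show ('{' : Char) :: (content ++ '}' :: rest2) = ('{' :: content) ++ '}' :: rest2 from rfl]
            rw [find_singleton (by simp; exact hnc) rest2]
            rw [if_neg (by omega)]
            push_cast [List.length_cons]
            ring
          rw [hget, if_neg (by decide), if_pos rfl, hfind, if_pos (by omega)]
          have htoNat : (((kept.length + (content.length + 1) : Nat) : Int)).toNat = kept.length + content.length + 1 := by
            rw [Int.toNat_natCast]; omega
          have hdrop1 : (kept ++ '{' :: (content ++ '}' :: rest2)).drop (kept.length + 1) = content ++ '}' :: rest2 := by
            rw [show kept ++ '{' :: (content ++ '}' :: rest2) = (kept ++ ['{']) ++ (content ++ '}' :: rest2) by simp]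
            rw [show kept.length + 1 = (kept ++ ['{']).length by simp]
            exact List.drop_left
          have hslice : PySem.List.slice (kept ++ '{' :: (content ++ '}' :: rest2))
              (some ((kept.length : Int) + 1)) (some ((kept.length + (content.length + 1) : Nat) : Int)) = content := by
            rw [show ((kept.length : Int) + 1) = ((kept.length + 1 : Nat) : Int) by push_cast; ring]
            rw [PySem.List.slice_natCast]
            rw [hdrop1, show kept.length + (content.length + 1) - (kept.length + 1) = content.length by omega]
            exact List.take_left
          have htake : (kept ++ '{' :: (content ++ '}' :: rest2)).take kept.length = kept :=
            List.take_left
          have hdrop2 : (kept ++ '{' :: (content ++ '}' :: rest2)).drop (kept.length + content.length + 1 + 1) = rest2 := by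
            rw [show kept ++ '{' :: (content ++ '}' :: rest2) = (kept ++ '{' :: content ++ ['}']) ++ rest2 by simp]
            rw [show kept.length + content.length + 1 + 1 = (kept ++ '{' :: content ++ ['}']).length by simp; omega]
            exact List.drop_left
          rw [hslice, htoNat]
          obtain ⟨d, hd⟩ := Option.isSome_iff_exists.mp hsome
          rw [hd]
          simp only
          rw [htake, hdrop2]
          rw [ih rest2 kept bpm (some d) hwf2 (by simp at hlt ⊢; omega)]
          have hr : nnScanB ('{' :: (content ++ '}' :: rest2)) 0 [] kept bpm denom
              = nnScanB rest2 0 content kept bpm (some d) := by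
            simp [nnScanB]
            rw [nnScanB_mode2 content hnc rest2 [] kept bpm denom]
            simp [hd]
          rw [hr]
          exact nnScanB_buf_irrel rest2 [] content kept bpm (some d)
        · -- ordinary character
          have hwf' : wfComma rest = true := by
            simpa [wfComma, wfAux, h1, h2] using hwf
          rw [hget, if_neg h1, if_neg h2]
          rw [show kept ++ c :: rest = (kept ++ [c]) ++ rest by simp,
              show kept.length + 1 = (kept ++ [c]).length by simp]
          rw [ih rest (kept ++ [c]) bpm denom hwf' (by simp at hlt ⊢; omega)]
          simp [nnScanB, h1, h2]

lemma comma_eq (comma : List Char) (h : wfComma comma = true) :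
    nnLoopA (2 * comma.length + 1) comma 0 [] none = nnScanB comma 0 [] [] [] none := by
  have := nnLoop_eq_scan (2 * comma.length + 1) comma [] [] none h (by omega)
  simpa using this

-- ===== VERDICT (by name: the statement is the Claim_ definition above) =====
theorem normalize_notation_spec : Claim_equal_normalize_notation := by
  intro notation_ _hdom hpre
  unfold Spec_normalize_notation normalize_notation normalize_notation_alt
  refine congrArg (fun l => String.ofList (PySem.Chars.join [','] l)) ?_
  refine List.map_congr_left ?_
  intro comma hc
  rw [comma_eq comma (hpre comma hc)]
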